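-- pv_equiv track=rewrite | github.com/amfaro/jarify | src/jarify/parser.py | _reinsert_line_rust_fmt_placeholders
-- ===== SOURCE A (Python) =====
-- def _reinsert_line_rust_fmt_placeholders(sql: str, insertions: list[tuple[list[str], list[str], str | None]]) -> str:
--     """Re-insert whole-line placeholder groups into formatted SQL.
--
--     Each group is inserted immediately before the first occurrence of its
--     anchor line (compared after stripping whitespace), preserving all lines in
--     the group in their original order.  Trailing blank lines recorded during
--     extraction are emitted after the group and before the anchor.  Groups with
--     no anchor are appended at the end.
--     """
--     if not insertions:
--         return sql
--
--     lines = sql.splitlines(keepends=True)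
--     # Work through groups in order; pop the first matching anchor each time so
--     # that two groups with the same anchor text land before different
--     # occurrences of that anchor in the formatted SQL.
--     pending = list(insertions)
--     result: list[str] = []
--
--     for line in lines:
--         stripped = line.strip()
--         for idx, (group, trailing_blanks, anchor) in enumerate(pending):
--             if anchor is not None and stripped == anchor:
--                 for placeholder in group:
--                     result.append(placeholder + "\n")
--                 result.extend(trailing_blanks)
--                 pending.pop(idx)
--                 break
--         result.append(line)
--
--     # Append any remaining (no-anchor) groups before the trailing newline
--     for group, trailing_blanks, _ in pending:
--         for placeholder in group:
--             result.append(placeholder + "\n")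
--         result.extend(trailing_blanks)
--
--     return "".join(result)
-- ===== SOURCE B (Python) =====
-- def _reinsert_line_rust_fmt_placeholders(sql: str, insertions: list[tuple[list[str], list[str], str | None]]) -> str:
--     if not insertions:
--         return sql
--
--     lines = sql.splitlines(keepends=True)
--
--     # One pass over the lines: FIFO queues of line indices per stripped text.
--     positions: dict[str, list[int]] = {}
--     for i, line in enumerate(lines):
--         positions.setdefault(line.strip(), []).append(i)
--
--     # One pass over the groups: pop the front occurrence of each anchor.
--     assigned: dict[int, tuple[list[str], list[str], str | None]] = {}
--     leftovers = []
--     for group in insertions: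
--         anchor = group[2]
--         queue = positions.get(anchor) if anchor is not None else None
--         if queue:
--             assigned[queue.pop(0)] = group
--         else:
--             leftovers.append(group)
--
--     # One merge pass: emit each line preceded by its assigned group.
--     out = []
--     for i, line in enumerate(lines):
--         group = assigned.get(i)
--         if group is not None:
--             placeholders, blanks, _ = group
--             for p in placeholders:
--                 out.append(p + "\n")
--             out.extend(blanks)
--         out.append(line)
--     for placeholders, blanks, _ in leftovers:
--         for p in placeholders:
--             out.append(p + "\n")
--         out.extend(blanks)
--     return "".join(out)
-- ===== Notes on version B (the rewrite author's own statement) =====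
-- stated objective: alternative
-- what changed: Replaces A's per-line linear scan over the pending groups (with pop on first match) by a precomputed dict mapping each stripped line to the FIFO list of its line indices, a single group-driven pass that pops the front occurrence of each anchor to build an index->group assignment, and one merge pass over the lines.
import Mathlib
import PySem

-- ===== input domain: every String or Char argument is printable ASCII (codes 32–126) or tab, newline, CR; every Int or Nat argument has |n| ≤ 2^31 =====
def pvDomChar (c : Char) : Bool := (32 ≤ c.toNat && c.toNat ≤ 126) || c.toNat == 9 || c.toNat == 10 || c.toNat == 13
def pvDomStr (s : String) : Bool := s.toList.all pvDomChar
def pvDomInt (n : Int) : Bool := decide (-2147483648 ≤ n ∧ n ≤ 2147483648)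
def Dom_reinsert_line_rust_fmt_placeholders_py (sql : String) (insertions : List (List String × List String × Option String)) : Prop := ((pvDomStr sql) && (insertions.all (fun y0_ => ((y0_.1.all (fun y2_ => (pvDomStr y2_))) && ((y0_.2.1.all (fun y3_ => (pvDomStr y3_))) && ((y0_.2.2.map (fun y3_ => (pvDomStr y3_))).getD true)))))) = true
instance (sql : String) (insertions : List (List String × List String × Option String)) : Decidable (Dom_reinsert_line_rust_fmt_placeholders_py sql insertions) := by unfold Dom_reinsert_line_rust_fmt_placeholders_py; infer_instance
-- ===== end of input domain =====

-- B replaces A's per-line scan of the pending groups by a precomputed index of line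
-- positions per stripped text, one group-driven assignment pass and one merge pass (alternative decomposition).

-- shared transliteration of str.splitlines(keepends=True): exact on the input domain
-- (printable ASCII + tab/newline/CR), where the only Python line breaks are "\n", "\r", "\r\n".
def pvBreakLine : List Char → List Char × List Char
  | [] => ([], [])
  | c :: rest =>
    if c = '\n' then (['\n'], rest)
    else if c = '\r' then
      match rest with
      | d :: rest' => if d = '\n' then (['\r', '\n'], rest') else (['\r'], d :: rest')
      | [] => (['\r'], [])
    else
      let p := pvBreakLine rest
      (c :: p.1, p.2)

lemma pvBreakLine_rest_lt : ∀ (cs : List Char), cs ≠ [] → (pvBreakLine cs).2.length < cs.length := by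
  intro cs
  induction cs with
  | nil => intro h; exact absurd rfl h
  | cons c rest ih =>
    intro _
    rw [pvBreakLine.eq_def]
    dsimp only
    split_ifs with h1 h2
    · simp
    · rcases rest with _ | ⟨d, ds⟩
      · simp
      · by_cases hd : d = '\n' <;> simp [hd]
    · rcases rest with _ | ⟨d, ds⟩
      · simp [pvBreakLine]
      · have := ih (by simp)
        simp only [List.length_cons] at this ⊢
        omega

def pvSplitKeep : List Char → List (List Char)
  | [] => []
  | c :: rest =>
    let p := pvBreakLine (c :: rest)
    p.1 :: pvSplitKeep p.2
termination_by cs => cs.length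
decreasing_by exact pvBreakLine_rest_lt (c :: rest) (by simp)

def pvSplitlinesKeep (s : String) : List String := (pvSplitKeep s.toList).map String.ofList

-- emission of one group: placeholders each followed by "\n", then the trailing blanks (both Pythons share this loop shape)
def pvEmit (g : List String × List String × Option String) : List String :=
  g.1.map (fun p => p ++ "\n") ++ g.2.1

-- ===== PORT A =====
-- inner 'for idx, (...) in enumerate(pending): if anchor is not None and stripped == anchor: ... pending.pop(idx); break'
def pvFindPop : List (List String × List String × Option String) → String →
    Option ((List String × List String × Option String) × List (List String × List String × Option String))
  | [], _ => none
  | g :: gs, s =>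
    if g.2.2 = some s then some (g, gs)
    else
      match pvFindPop gs s with
      | some p => some (p.1, g :: p.2)
      | none => none

-- the main 'for line in lines' loop, carrying (pending, result)
def pvALoop : List String → List (List String × List String × Option String) → List String →
    List (List String × List String × Option String) × List String
  | [], pending, result => (pending, result)
  | line :: rest, pending, result =>
    match pvFindPop pending (PySem.Str.strip line) with
    | some p => pvALoop rest p.2 (result ++ pvEmit p.1 ++ [line])
    | none => pvALoop rest pending (result ++ [line])

def reinsert_line_rust_fmt_placeholders_py (sql : String) (insertions : List (List String × List String × Option String)) : String :=
  if insertions = [] then sql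
  else
    let lines := pvSplitlinesKeep sql
    let r := pvALoop lines insertions []
    let result := r.1.foldl (fun res g => res ++ pvEmit g) r.2
    PySem.Str.join "" result

-- ===== PORT B =====
-- positions.setdefault(line.strip(), []).append(i)
def pvBuildStep (pos : PySem.Dict String (List Int)) (p : Int × String) : PySem.Dict String (List Int) :=
  pos.insert (PySem.Str.strip p.2) (pos.getD (PySem.Str.strip p.2) [] ++ [p.1])

def pvBuildPos (lines : List String) : PySem.Dict String (List Int) :=
  (PySem.List.enumerate lines 0).foldl pvBuildStep PySem.Dict.empty

-- one step of the group loop; 'if queue:' is false both for a missing key and for an emptied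
-- queue, so positions.get(anchor) is ported as getD anchor []
def pvAssignStep (st : PySem.Dict String (List Int) × PySem.Dict Int (List String × List String × Option String) × List (List String × List String × Option String))
    (g : List String × List String × Option String) :
    PySem.Dict String (List Int) × PySem.Dict Int (List String × List String × Option String) × List (List String × List String × Option String) :=
  match g.2.2 with
  | none => (st.1, st.2.1, st.2.2 ++ [g])
  | some t =>
    match st.1.getD t [] with
    | [] => (st.1, st.2.1, st.2.2 ++ [g])
    | i :: rest => (st.1.insert t rest, st.2.1.insert i g, st.2.2)

def pvMergeStep (asg : PySem.Dict Int (List String × List String × Option String))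
    (out : List String) (p : Int × String) : List String :=
  (match asg.get? p.1 with
   | some g => out ++ pvEmit g
   | none => out) ++ [p.2]

def reinsert_line_rust_fmt_placeholders_py_alt (sql : String) (insertions : List (List String × List String × Option String)) : String :=
  if insertions = [] then sql
  else
    let lines := pvSplitlinesKeep sql
    let st := insertions.foldl pvAssignStep (pvBuildPos lines, PySem.Dict.empty, [])
    let out := (PySem.List.enumerate lines 0).foldl (pvMergeStep st.2.1) []
    let out := st.2.2.foldl (fun res g => res ++ pvEmit g) out
    PySem.Str.join "" out

-- ===== PRECONDITION & SPEC =====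
def Spec_reinsert_line_rust_fmt_placeholders_py (sql : String) (insertions : List (List String × List String × Option String)) (out : String) : Prop := out = reinsert_line_rust_fmt_placeholders_py_alt sql insertions
instance (sql : String) (insertions : List (List String × List String × Option String)) (out : String) : Decidable (Spec_reinsert_line_rust_fmt_placeholders_py sql insertions out) := by unfold Spec_reinsert_line_rust_fmt_placeholders_py; infer_instance

-- ===== CLAIM (what is proved, stated in full; the proofs are below) =====
def Claim_equal_reinsert_line_rust_fmt_placeholders_py : Prop := ∀ (sql : String) (insertions : List (List String × List String × Option String)), Dom_reinsert_line_rust_fmt_placeholders_py sql insertions → Spec_reinsert_line_rust_fmt_placeholders_py sql insertions (reinsert_line_rust_fmt_placeholders_py sql insertions)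

-- ===== LEMMAS AND PROOFS =====

abbrev PvG := List String × List String × Option String
abbrev PvPM := String → List Int

def pvUpd (pm : PvPM) (t : String) (v : List Int) : PvPM := fun s => if s = t then v else pm s

-- B's group loop, abstracted: the positions dict as a function, the assigned dict as a lookup
-- function (later assignments win, as dict insert overwrites), leftovers as a list
def pvBAF : List PvG → PvPM → (Int → Option PvG) × List PvG
  | [], _ => (fun _ => none, [])
  | g :: gs, pm =>
    match g.2.2 with
    | none => let p := pvBAF gs pm; (p.1, g :: p.2)
    | some t =>
      match pm t with
      | [] => let p := pvBAF gs pm; (p.1, g :: p.2)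
      | i :: rest =>
        let p := pvBAF gs (pvUpd pm t rest)
        (fun j => match p.1 j with | some g' => some g' | none => if j = i then some g else none, p.2)

-- indices (from n) of the lines whose stripped text is s
def pvOcc : Int → List String → String → List Int
  | _, [], _ => []
  | n, l :: ls, s => if s = PySem.Str.strip l then n :: pvOcc (n + 1) ls s else pvOcc (n + 1) ls s

-- A's loop without the accumulators: (output lines, final pending)
def pvARun : List String → List PvG → List String × List PvG
  | [], gs => ([], gs)
  | l :: rest, gs =>
    match pvFindPop gs (PySem.Str.strip l) with
    | some p => let q := pvARun rest p.2; (pvEmit p.1 ++ l :: q.1, q.2)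
    | none => let q := pvARun rest gs; (l :: q.1, q.2)

-- B's merge loop, abstracted over the assignment lookup function
def pvRenderF : List String → (Int → Option PvG) → List String
  | [], _ => []
  | l :: rest, f =>
    (match f 0 with | some g => pvEmit g | none => []) ++ l :: pvRenderF rest (fun j => f (j + 1))

def pvPmOf (pos : PySem.Dict String (List Int)) : PvPM := fun s => pos.getD s []

def pvShape (σ : String) (pm : PvPM) : PvPM :=
  fun s => if s = σ then 0 :: (pm s).map (· + 1) else (pm s).map (· + 1)

lemma pvALoop_eq (lines : List String) : ∀ (gs : List PvG) (res : List String),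
    pvALoop lines gs res = ((pvARun lines gs).2, res ++ (pvARun lines gs).1) := by
  induction lines with
  | nil => intro gs res; simp [pvALoop, pvARun]
  | cons l rest ih =>
    intro gs res
    rw [pvALoop, pvARun]
    cases h : pvFindPop gs (PySem.Str.strip l) with
    | none => simp [ih, List.append_assoc]
    | some p => simp [ih, List.append_assoc]

lemma pvFoldl_emit (gs : List PvG) : ∀ (res : List String),
    gs.foldl (fun r g => r ++ pvEmit g) res = res ++ gs.flatMap pvEmit := by
  induction gs with
  | nil => simp
  | cons g gs ih => intro res; simp [ih, List.append_assoc]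

lemma pvOcc_succ (ls : List String) : ∀ (n : Int) (s : String),
    pvOcc (n + 1) ls s = (pvOcc n ls s).map (· + 1) := by
  induction ls with
  | nil => intro n s; simp [pvOcc]
  | cons l ls ih =>
    intro n s
    rw [pvOcc, pvOcc]
    split_ifs with h
    · simp [ih]
    · simp [ih]

lemma pvOcc_nonneg (ls : List String) : ∀ (n : Int) (s : String) (i : Int), i ∈ pvOcc n ls s → n ≤ i := by
  induction ls with
  | nil => intro n s i h; simp [pvOcc] at h
  | cons l ls ih =>
    intro n s i h
    rw [pvOcc] at h
    split_ifs at h with hc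
    · rcases List.mem_cons.mp h with rfl | h2
      · omega
      · have := ih (n + 1) s i h2; omega
    · have := ih (n + 1) s i h; omega

lemma pvOcc_cons (l : String) (rest : List String) :
    pvOcc 0 (l :: rest) = pvShape (PySem.Str.strip l) (pvOcc 0 rest) := by
  funext s
  rw [pvOcc, pvShape, pvOcc_succ rest 0 s]

lemma pvBAF_nil_pm (gs : List PvG) :
    (∀ j, (pvBAF gs (fun _ => [])).1 j = none) ∧ (pvBAF gs (fun _ => [])).2 = gs := by
  induction gs with
  | nil => simp [pvBAF]
  | cons g gs ih =>
    rw [pvBAF]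
    cases h : g.2.2 with
    | none => simpa using ih
    | some t => simpa using ih

lemma pvUpd_map (pm : PvPM) (t : String) (tl : List Int) :
    pvUpd (fun s => (pm s).map (· + 1)) t (tl.map (· + 1)) = fun s => (pvUpd pm t tl s).map (· + 1) := by
  funext s
  rw [pvUpd, pvUpd]
  split_ifs <;> rfl

lemma pvUpd_shape_self (σ : String) (pm : PvPM) :
    pvUpd (pvShape σ pm) σ ((pm σ).map (· + 1)) = fun s => (pm s).map (· + 1) := by
  funext s
  rw [pvUpd, pvShape]
  split_ifs with h
  · rw [h]
  · rfl

lemma pvUpd_shape_other (σ t : String) (pm : PvPM) (tl : List Int) (h : t ≠ σ) :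
    pvUpd (pvShape σ pm) t (tl.map (· + 1)) = pvShape σ (pvUpd pm t tl) := by
  funext s
  by_cases h1 : s = t
  · simp [pvUpd, pvShape, h1, h]
  · by_cases h2 : s = σ <;> simp [pvUpd, pvShape, h1, h2, Ne.symm h]

lemma pvUpd_nonneg (pm : PvPM) (t : String) (v : List Int)
    (hpm : ∀ s i, i ∈ pm s → 0 ≤ i) (hv : ∀ i ∈ v, 0 ≤ i) :
    ∀ s i, i ∈ pvUpd pm t v s → 0 ≤ i := by
  intro s i h
  rw [pvUpd] at h
  split_ifs at h with h1
  · exact hv i h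
  · exact hpm s i h

lemma pvBAF_shift (gs : List PvG) : ∀ (pm : PvPM), (∀ s i, i ∈ pm s → 0 ≤ i) →
    ((pvBAF gs (fun s => (pm s).map (· + 1))).1 0 = none)
    ∧ (∀ j : Int, 0 ≤ j → (pvBAF gs (fun s => (pm s).map (· + 1))).1 (j + 1) = (pvBAF gs pm).1 j)
    ∧ (pvBAF gs (fun s => (pm s).map (· + 1))).2 = (pvBAF gs pm).2 := by
  induction gs with
  | nil => intro pm _; exact ⟨rfl, fun j _ => rfl, rfl⟩
  | cons g gs ih =>
    intro pm hpm
    simp only [pvBAF]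
    cases hg : g.2.2 with
    | none =>
      obtain ⟨h0, hs, hl⟩ := ih pm hpm
      exact ⟨h0, hs, by rw [hl]⟩
    | some t =>
      cases hq : pm t with
      | nil =>
        simp only [hq, List.map_nil]
        obtain ⟨h0, hs, hl⟩ := ih pm hpm
        exact ⟨h0, hs, by rw [hl]⟩
      | cons i0 tl =>
        simp only [hq, List.map_cons, pvUpd_map]
        have htl : ∀ i ∈ tl, 0 ≤ i := fun i hi => hpm t i (by rw [hq]; exact List.mem_cons_of_mem _ hi)
        obtain ⟨h0, hs, hl⟩ := ih (pvUpd pm t tl) (pvUpd_nonneg pm t tl hpm htl)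
        have hi0 : 0 ≤ i0 := hpm t i0 (by rw [hq]; exact List.mem_cons_self)
        refine ⟨?_, ?_, hl⟩
        · rw [h0, if_neg (by omega)]
        · intro j hj
          rw [hs j hj]
          cases hv : (pvBAF gs (pvUpd pm t tl)).1 j with
          | some g' => rfl
          | none =>
            by_cases hji : j = i0
            · rw [if_pos (by omega), if_pos hji]
            · rw [if_neg (by omega), if_neg hji]

-- the exchange lemma: B's group-driven assignment against a "cons" positions map agrees with
-- A's first-match removal on the head line
lemma pvBAF_cons (gs : List PvG) : ∀ (σ : String) (pm : PvPM), (∀ s i, i ∈ pm s → 0 ≤ i) →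
    match pvFindPop gs σ with
    | some p =>
        (pvBAF gs (pvShape σ pm)).1 0 = some p.1
        ∧ (∀ j : Int, 0 ≤ j → (pvBAF gs (pvShape σ pm)).1 (j + 1) = (pvBAF p.2 pm).1 j)
        ∧ (pvBAF gs (pvShape σ pm)).2 = (pvBAF p.2 pm).2
    | none =>
        (pvBAF gs (pvShape σ pm)).1 0 = none
        ∧ (∀ j : Int, 0 ≤ j → (pvBAF gs (pvShape σ pm)).1 (j + 1) = (pvBAF gs pm).1 j)
        ∧ (pvBAF gs (pvShape σ pm)).2 = (pvBAF gs pm).2 := by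
  induction gs with
  | nil =>
    intro σ pm _
    simp only [pvFindPop]
    exact ⟨rfl, fun j _ => rfl, rfl⟩
  | cons g gs ih =>
    intro σ pm hpm
    rw [pvFindPop]
    by_cases hgσ : g.2.2 = some σ
    · rw [if_pos hgσ]
      have hσq : pvShape σ pm σ = 0 :: (pm σ).map (· + 1) := by rw [pvShape]; simp
      simp only [pvBAF, hgσ, hσq, pvUpd_shape_self]
      obtain ⟨h0, hs, hl⟩ := pvBAF_shift gs pm hpm
      refine ⟨?_, ?_, hl⟩
      · simp [h0]
      · intro j hj
        rw [hs j hj]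
        cases hv : (pvBAF gs pm).1 j with
        | some g' => rfl
        | none => simp only; rw [if_neg (by omega)]
    · rw [if_neg hgσ]
      cases hg : g.2.2 with
      | none =>
        have IH := ih σ pm hpm
        cases hf : pvFindPop gs σ with
        | some q =>
          rw [hf] at IH
          simp only [pvBAF, hg]
          obtain ⟨h0, hs, hl⟩ := IH
          exact ⟨h0, hs, by rw [hl]⟩
        | none =>
          rw [hf] at IH
          simp only [pvBAF, hg]
          obtain ⟨h0, hs, hl⟩ := IH
          exact ⟨h0, hs, by rw [hl]⟩
      | some t =>
        have htσ : t ≠ σ := fun he => hgσ (by rw [hg, he])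
        have hshape_t : pvShape σ pm t = (pm t).map (· + 1) := by rw [pvShape, if_neg htσ]
        cases hq : pm t with
        | nil =>
          have hq2 : pvShape σ pm t = [] := by rw [hshape_t, hq]; rfl
          have IH := ih σ pm hpm
          cases hf : pvFindPop gs σ with
          | some q =>
            rw [hf] at IH
            simp only [pvBAF, hg, hq2, hq]
            obtain ⟨h0, hs, hl⟩ := IH
            exact ⟨h0, hs, by rw [hl]⟩
          | none =>
            rw [hf] at IH
            simp only [pvBAF, hg, hq2, hq]
            obtain ⟨h0, hs, hl⟩ := IH
            exact ⟨h0, hs, by rw [hl]⟩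
        | cons i0 tl =>
          have hq2 : pvShape σ pm t = (i0 + 1) :: tl.map (· + 1) := by rw [hshape_t, hq]; rfl
          have htl : ∀ i ∈ tl, 0 ≤ i := fun i hi => hpm t i (by rw [hq]; exact List.mem_cons_of_mem _ hi)
          have hi0 : 0 ≤ i0 := hpm t i0 (by rw [hq]; exact List.mem_cons_self)
          have hupd := pvUpd_shape_other σ t pm tl htσ
          have IH := ih σ (pvUpd pm t tl) (pvUpd_nonneg pm t tl hpm htl)
          cases hf : pvFindPop gs σ with
          | some q =>
            rw [hf] at IH
            simp only [pvBAF, hg, hq2, hq, hupd]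
            obtain ⟨h0, hs, hl⟩ := IH
            refine ⟨?_, ?_, by rw [hl]⟩
            · simp only [h0]
            · intro j hj
              rw [hs j hj]
              cases hv : (pvBAF q.2 (pvUpd pm t tl)).1 j with
              | some g' => rfl
              | none =>
                by_cases hji : j = i0
                · rw [if_pos (by omega), if_pos hji]
                · rw [if_neg (by omega), if_neg hji]
          | none =>
            rw [hf] at IH
            simp only [pvBAF, hg, hq2, hq, hupd]
            obtain ⟨h0, hs, hl⟩ := IH
            refine ⟨?_, ?_, by rw [hl]⟩
            · simp only [h0]
              try exact if_neg (by omega)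
            · intro j hj
              rw [hs j hj]
              cases hv : (pvBAF gs (pvUpd pm t tl)).1 j with
              | some g' => rfl
              | none =>
                by_cases hji : j = i0
                · rw [if_pos (by omega), if_pos hji]
                · rw [if_neg (by omega), if_neg hji]

lemma pvRenderF_congr (lines : List String) : ∀ (f f' : Int → Option PvG),
    (∀ j : Int, 0 ≤ j → f j = f' j) → pvRenderF lines f = pvRenderF lines f' := by
  induction lines with
  | nil => intro f f' h; rfl
  | cons l rest ih =>
    intro f f' h
    rw [pvRenderF, pvRenderF, h 0 le_rfl, ih (fun j => f (j + 1)) (fun j => f' (j + 1))]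
    intro j hj
    exact h (j + 1) (by omega)

-- main bridge: A's run renders B's abstract assignment
lemma pvARun_eq_render (lines : List String) : ∀ (gs : List PvG),
    pvARun lines gs
      = (pvRenderF lines (pvBAF gs (pvOcc 0 lines)).1, (pvBAF gs (pvOcc 0 lines)).2) := by
  induction lines with
  | nil =>
    intro gs
    have hocc : pvOcc 0 ([] : List String) = fun _ => [] := funext fun s => rfl
    rw [pvARun, hocc, pvRenderF, (pvBAF_nil_pm gs).2]
  | cons l rest ih =>
    intro gs
    rw [pvARun, pvOcc_cons l rest]
    have hE := pvBAF_cons gs (PySem.Str.strip l) (pvOcc 0 rest)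
      (fun s i hi => pvOcc_nonneg rest 0 s i hi)
    cases hf : pvFindPop gs (PySem.Str.strip l) with
    | some p =>
      rw [hf] at hE
      obtain ⟨h0, hs, hl⟩ := hE
      dsimp only
      rw [ih p.2, pvRenderF, h0, Prod.mk.injEq]
      refine ⟨?_, hl.symm⟩
      rw [pvRenderF_congr rest (pvBAF p.2 (pvOcc 0 rest)).1
        (fun j => (pvBAF gs (pvShape (PySem.Str.strip l) (pvOcc 0 rest))).1 (j + 1))
        (fun j hj => (hs j hj).symm)]
    | none =>
      rw [hf] at hE
      obtain ⟨h0, hs, hl⟩ := hE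
      dsimp only
      rw [ih gs, pvRenderF, h0, Prod.mk.injEq]
      refine ⟨?_, hl.symm⟩
      rw [pvRenderF_congr rest (pvBAF gs (pvOcc 0 rest)).1
        (fun j => (pvBAF gs (pvShape (PySem.Str.strip l) (pvOcc 0 rest))).1 (j + 1))
        (fun j hj => (hs j hj).symm)]
      simp

lemma pvAssignFold (gs : List PvG) : ∀ (pos : PySem.Dict String (List Int))
    (asg : PySem.Dict Int PvG) (left : List PvG),
    (∀ j, (gs.foldl pvAssignStep (pos, asg, left)).2.1.get? j
        = match (pvBAF gs (pvPmOf pos)).1 j with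
          | some g => some g
          | none => asg.get? j)
    ∧ (gs.foldl pvAssignStep (pos, asg, left)).2.2 = left ++ (pvBAF gs (pvPmOf pos)).2 := by
  induction gs with
  | nil =>
    intro pos asg left
    exact ⟨fun j => rfl, by simp [pvBAF]⟩
  | cons g gs ih =>
    intro pos asg left
    rw [List.foldl_cons]
    cases hg : g.2.2 with
    | none =>
      have hstep : pvAssignStep (pos, asg, left) g = (pos, asg, left ++ [g]) := by
        rw [pvAssignStep, hg]
      rw [hstep]
      obtain ⟨h1, h2⟩ := ih pos asg (left ++ [g])
      simp only [pvBAF, hg]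
      exact ⟨h1, by rw [h2]; simp⟩
    | some t =>
      cases hq : pos.getD t [] with
      | nil =>
        have hstep : pvAssignStep (pos, asg, left) g = (pos, asg, left ++ [g]) := by
          rw [pvAssignStep, hg]
          simp [hq]
        rw [hstep]
        obtain ⟨h1, h2⟩ := ih pos asg (left ++ [g])
        have hpm : pvPmOf pos t = [] := hq
        simp only [pvBAF, hg, hpm]
        exact ⟨h1, by rw [h2]; simp⟩
      | cons i rest =>
        have hstep : pvAssignStep (pos, asg, left) g = (pos.insert t rest, asg.insert i g, left) := by
          rw [pvAssignStep, hg]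
          simp [hq]
        rw [hstep]
        have hpm : pvPmOf (pos.insert t rest) = pvUpd (pvPmOf pos) t rest := by
          funext s
          rw [pvPmOf, pvUpd, pvPmOf, PySem.Dict.getD_insert]
        obtain ⟨h1, h2⟩ := ih (pos.insert t rest) (asg.insert i g) left
        rw [hpm] at h1 h2
        have hpmt : pvPmOf pos t = i :: rest := hq
        simp only [pvBAF, hg, hpmt]
        refine ⟨?_, h2⟩
        intro j
        rw [h1 j]
        cases hv : (pvBAF gs (pvUpd (pvPmOf pos) t rest)).1 j with
        | some g' => rfl
        | none =>
          simp only
          rw [PySem.Dict.get?_insert]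
          split_ifs with hji
          · rfl
          · rfl

lemma pvBuildFold (lines : List String) : ∀ (n : Int) (pos : PySem.Dict String (List Int)),
    pvPmOf ((PySem.List.enumerate lines n).foldl pvBuildStep pos)
      = fun s => pvPmOf pos s ++ pvOcc n lines s := by
  induction lines with
  | nil =>
    intro n pos
    funext s
    rw [PySem.List.enumerate_nil]
    simp [pvOcc]
  | cons l rest ih =>
    intro n pos
    rw [PySem.List.enumerate_cons, List.foldl_cons, ih (n + 1) (pvBuildStep pos (n, l))]
    funext s
    have hb : pvPmOf (pvBuildStep pos (n, l)) s
        = if s = PySem.Str.strip l then pvPmOf pos (PySem.Str.strip l) ++ [n] else pvPmOf pos s := by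
      rw [pvBuildStep, pvPmOf, pvPmOf, PySem.Dict.getD_insert]
      rfl
    simp only [hb]
    rw [pvOcc]
    split_ifs with h
    · subst h; simp [pvPmOf]
    · rfl

lemma pvMergeFold (asg : PySem.Dict Int PvG) (lines : List String) : ∀ (n : Int) (out : List String),
    (PySem.List.enumerate lines n).foldl (pvMergeStep asg) out
      = out ++ pvRenderF lines (fun j => asg.get? (n + j)) := by
  induction lines with
  | nil => intro n out; rw [PySem.List.enumerate_nil]; simp [pvRenderF]
  | cons l rest ih =>
    intro n out
    rw [PySem.List.enumerate_cons, List.foldl_cons, ih (n + 1)]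
    have hr : pvRenderF (l :: rest) (fun j => asg.get? (n + j))
        = (match asg.get? n with | some g => pvEmit g | none => []) ++ l
          :: pvRenderF rest (fun j => asg.get? (n + 1 + j)) := by
      rw [pvRenderF]
      have h1 : n + 0 = n := by ring
      have h2 : pvRenderF rest (fun j => asg.get? (n + (j + 1)))
          = pvRenderF rest (fun j => asg.get? (n + 1 + j)) :=
        pvRenderF_congr rest _ _ (fun j _ => by rw [show n + (j + 1) = n + 1 + j from by ring])
      rw [h1, h2]
    rw [hr, pvMergeStep]
    cases hv : asg.get? n with
    | some g => simp
    | none => simp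

-- ===== VERDICT (by name: the statement is the Claim_ definition above) =====
theorem reinsert_line_rust_fmt_placeholders_py_spec : Claim_equal_reinsert_line_rust_fmt_placeholders_py := by
  intro sql ins _dom
  unfold Spec_reinsert_line_rust_fmt_placeholders_py
  rw [reinsert_line_rust_fmt_placeholders_py, reinsert_line_rust_fmt_placeholders_py_alt]
  by_cases h : ins = []
  · rw [if_pos h, if_pos h]
  · rw [if_neg h, if_neg h]
    dsimp only
    apply congrArg
    set lines := pvSplitlinesKeep sql with hlines
    -- A side
    rw [pvALoop_eq lines ins [], pvFoldl_emit, pvARun_eq_render lines ins]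
    -- B side
    have hbuild : pvPmOf (pvBuildPos lines) = pvOcc 0 lines := by
      rw [pvBuildPos, pvBuildFold lines 0 PySem.Dict.empty]
      funext s
      rw [pvPmOf]
      simp [PySem.Dict.getD_empty]
    obtain ⟨hget, hleft⟩ := pvAssignFold ins (pvBuildPos lines) PySem.Dict.empty []
    rw [hbuild] at hget hleft
    rw [pvMergeFold, pvFoldl_emit, hleft]
    have hF : ∀ j : Int, 0 ≤ j →
        (pvBAF ins (pvOcc 0 lines)).1 j
          = (ins.foldl pvAssignStep (pvBuildPos lines, PySem.Dict.empty, [])).2.1.get? (0 + j) := by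
      intro j _
      rw [hget (0 + j), show (0 : Int) + j = j from by ring]
      cases hv : (pvBAF ins (pvOcc 0 lines)).1 j with
      | some g => rfl
      | none => simp [PySem.Dict.get?_empty]
    rw [pvRenderF_congr lines (pvBAF ins (pvOcc 0 lines)).1
      (fun j => (ins.foldl pvAssignStep (pvBuildPos lines, PySem.Dict.empty, [])).2.1.get? (0 + j)) hF]
    simp
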